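-- pv_equiv track=rewrite | github.com/martenlienen/master-thesis | doc/figures/results/label_error_rate.py | label_sequence
-- ===== SOURCE A (Python) =====
-- def label_sequence(sequence, label_index):
--     blank = label_index.index("<blank>")
--     labels = []
--
--     label = None
--     for i in range(len(sequence)):
--         if label is None or label != sequence[i]:
--             label = sequence[i]
--             labels.append(label)
--
--     # Filter out blanks
--     labels = [l for l in labels if l != blank]
--
--     return labels
-- ===== SOURCE B (Python) =====
-- def label_sequence(sequence, label_index):
--     blank = label_index.index("<blank>")
--     out = []
--     prev = None
--     for x in sequence:
--         if x != prev and x != blank: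
--             out.append(x)
--         prev = x
--     return out
-- ===== Notes on version B (the rewrite author's own statement) =====
-- stated objective: simpler
-- what changed: Fuses A's two passes (manual dedup loop over indices, then a blank-filtering comprehension) into one loop over the elements that tracks the previous raw value and appends only non-blank changes.
import Mathlib
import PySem

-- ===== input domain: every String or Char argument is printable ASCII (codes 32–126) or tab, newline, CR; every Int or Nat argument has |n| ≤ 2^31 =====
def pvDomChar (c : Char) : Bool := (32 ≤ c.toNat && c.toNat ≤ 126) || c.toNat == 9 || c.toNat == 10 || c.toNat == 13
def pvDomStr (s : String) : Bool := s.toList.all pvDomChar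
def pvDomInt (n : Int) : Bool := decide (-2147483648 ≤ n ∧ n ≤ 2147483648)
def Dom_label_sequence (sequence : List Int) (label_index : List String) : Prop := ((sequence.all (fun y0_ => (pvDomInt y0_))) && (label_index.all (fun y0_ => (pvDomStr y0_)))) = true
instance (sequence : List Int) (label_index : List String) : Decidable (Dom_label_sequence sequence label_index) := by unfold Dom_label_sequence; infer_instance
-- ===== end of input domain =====

-- B fuses A's two passes (dedup loop then blank filter) into one loop tracking the previous raw value (objective: simpler).

-- ===== PORT A =====
def label_sequence (sequence : List Int) (label_index : List String) : List Int :=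
  match PySem.List.index? label_index "<blank>" with
  | none => []  -- Python raises ValueError here; excluded by Pre_
  | some bk =>
    let blank : Int := bk
    let st := (PySem.List.pyRange 0 (PySem.List.len sequence) 1).foldl
      (fun (st : Option Int × List Int) i =>
        let x := PySem.List.pyGetD sequence i 0
        match st.1 with
        | none => (some x, st.2 ++ [x])
        | some l => if l ≠ x then (some x, st.2 ++ [x]) else st)
      (none, [])
    st.2.filter (fun l => l != blank)

-- ===== PORT B =====
def label_sequence_alt (sequence : List Int) (label_index : List String) : List Int :=
  match PySem.List.index? label_index "<blank>" with
  | none => []  -- Python raises ValueError here; excluded by Pre_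
  | some bk =>
    let blank : Int := bk
    (sequence.foldl
      (fun (st : Option Int × List Int) x =>
        (some x, if st.1 ≠ some x ∧ x ≠ blank then st.2 ++ [x] else st.2))
      (none, [])).2

-- ===== PRECONDITION & SPEC =====
-- Pre_: label_index must contain "<blank>", else A's .index call raises ValueError.
def Pre_label_sequence (sequence : List Int) (label_index : List String) : Prop :=
  label_index.contains "<blank>" = true
instance (sequence : List Int) (label_index : List String) : Decidable (Pre_label_sequence sequence label_index) := by unfold Pre_label_sequence; infer_instance
def pvWitness_label_sequence : List Int × List String := ([0, 0, 1, 2, 2, 1], ["a", "<blank>", "c"])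

def Spec_label_sequence (sequence : List Int) (label_index : List String) (out : List Int) : Prop := out = label_sequence_alt sequence label_index
instance (sequence : List Int) (label_index : List String) (out : List Int) : Decidable (Spec_label_sequence sequence label_index out) := by unfold Spec_label_sequence; infer_instance

-- ===== CLAIM (what is proved, stated in full; the proofs are below) =====
def Claim_equal_label_sequence : Prop := ∀ (sequence : List Int) (label_index : List String), Dom_label_sequence sequence label_index → Pre_label_sequence sequence label_index → Spec_label_sequence sequence label_index (label_sequence sequence label_index)

-- ===== LEMMAS AND PROOFS =====

-- Invariant: filtering A's accumulated labels equals B's fused accumulation,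
-- for any common previous value and related accumulators.
theorem fuse_invariant (blank : Int) (xs : List Int) (prev : Option Int) (acc : List Int) :
    ((xs.foldl
      (fun (st : Option Int × List Int) i =>
        match st.1 with
        | none => (some i, st.2 ++ [i])
        | some l => if l ≠ i then (some i, st.2 ++ [i]) else st)
      (prev, acc)).2).filter (fun l => l != blank)
    = (xs.foldl
      (fun (st : Option Int × List Int) x =>
        (some x, if st.1 ≠ some x ∧ x ≠ blank then st.2 ++ [x] else st.2))
      (prev, acc.filter (fun l => l != blank))).2 := by
  induction xs generalizing prev acc with
  | nil => simp
  | cons x xs ih =>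
    simp only [List.foldl_cons]
    have hx := ih (some x) (acc ++ [x])
    rw [List.filter_append, List.filter_singleton] at hx
    cases prev with
    | none =>
      by_cases hb : x = blank
      · simpa [hb, Bool.cond_eq_ite] using hx
      · simpa [hb, Bool.cond_eq_ite] using hx
    | some l =>
      by_cases hlx : l = x
      · subst hlx
        simpa using ih (some l) acc
      · by_cases hb : x = blank
        · subst hb
          simpa [hlx, Bool.cond_eq_ite] using hx
        · simpa [hlx, hb, Bool.cond_eq_ite] using hx

-- ===== VERDICT (by name: the statement is the Claim_ definition above) =====
theorem label_sequence_spec : Claim_equal_label_sequence := by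
  intro sequence label_index _ hpre
  unfold Spec_label_sequence label_sequence label_sequence_alt
  obtain ⟨bk, hidx⟩ := Option.isSome_iff_exists.mp
    ((PySem.List.index?_isSome_iff (xs := label_index) (v := "<blank>")).2
      (by unfold Pre_label_sequence at hpre; exact List.contains_iff_mem.mp hpre))
  rw [hidx]
  dsimp only
  rw [PySem.List.foldl_pyRange_zero_pyGetD sequence 0
    (fun (st : Option Int × List Int) x =>
      match st.1 with
      | none => (some x, st.2 ++ [x])
      | some l => if l ≠ x then (some x, st.2 ++ [x]) else st)
    (none, [])]
  exact fuse_invariant bk sequence none []
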